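-- pv_equiv track=rewrite | github.com/alexanderplesovskikh/qa_generator | genfile.py | merge_n_neighbors
-- ===== SOURCE A (Python) =====
-- def merge_n_neighbors(strings, n=2):
--     if n < 1:
--         raise ValueError("n must be at least 1")
--
--     merged = [
--         " ".join(strings[i:i+n])
--         for i in range(0, len(strings), n)
--     ]
--
--     return merged
-- ===== SOURCE B (Python) =====
-- def merge_n_neighbors(strings, n=2):
--     if n < 1:
--         raise ValueError("n must be at least 1")
--
--     merged = []
--     current = []
--     for s in strings:
--         current.append(s)
--         if len(current) == n:
--             merged.append(" ".join(current))
--             current = []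
--     if current:
--         merged.append(" ".join(current))
--
--     return merged
-- ===== Notes on version B (the rewrite author's own statement) =====
-- stated objective: alternative
-- what changed: Replaces the index-range-and-slice comprehension with a single buffered pass that accumulates elements in a running chunk and emits it when it reaches size n (plus a trailing partial chunk).
import Mathlib
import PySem

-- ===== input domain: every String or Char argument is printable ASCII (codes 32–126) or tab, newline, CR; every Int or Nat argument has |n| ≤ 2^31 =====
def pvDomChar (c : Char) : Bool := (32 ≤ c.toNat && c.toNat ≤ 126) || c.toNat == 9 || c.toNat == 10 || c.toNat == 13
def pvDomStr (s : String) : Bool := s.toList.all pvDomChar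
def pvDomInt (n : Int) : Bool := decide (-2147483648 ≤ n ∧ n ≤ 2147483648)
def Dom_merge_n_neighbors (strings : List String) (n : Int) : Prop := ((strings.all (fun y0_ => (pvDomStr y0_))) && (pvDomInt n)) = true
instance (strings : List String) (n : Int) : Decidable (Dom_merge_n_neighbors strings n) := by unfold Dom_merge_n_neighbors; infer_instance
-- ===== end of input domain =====

-- B re-groups by a single buffered pass instead of A's index-range-and-slice comprehension; same cost, different decomposition.

-- ===== PORT A =====
-- merged = [" ".join(strings[i:i+n]) for i in range(0, len(strings), n)]
def merge_n_neighbors (strings : List String) (n : Int) : List String :=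
  (PySem.List.pyRange 0 (strings.length : Int) n).map
    (fun i => PySem.Str.join " " (PySem.List.slice strings (some i) (some (i + n))))

-- ===== PORT B =====
-- loop body: current.append(s); if len(current) == n: merged.append(" ".join(current)); current = []
def pvStep (n : Int) (st : List String × List String) (s : String) : List String × List String :=
  let cur := st.2 ++ [s]
  if (cur.length : Int) = n then (st.1 ++ [PySem.Str.join " " cur], []) else (st.1, cur)

-- after the loop: if current: merged.append(" ".join(current))
def pvFinish (st : List String × List String) : List String :=
  if st.2 = [] then st.1 else st.1 ++ [PySem.Str.join " " st.2]

def merge_n_neighbors_alt (strings : List String) (n : Int) : List String :=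
  pvFinish (strings.foldl (pvStep n) ([], []))

-- ===== PRECONDITION & SPEC =====
-- Both programs raise ValueError when n < 1; Pre_ is exactly A's normal-return domain.
def Pre_merge_n_neighbors (strings : List String) (n : Int) : Prop := 1 ≤ n
instance (strings : List String) (n : Int) : Decidable (Pre_merge_n_neighbors strings n) := by unfold Pre_merge_n_neighbors; infer_instance
def pvWitness_merge_n_neighbors : List String × Int := (["a", "b", "c"], 2)

def Spec_merge_n_neighbors (strings : List String) (n : Int) (out : List String) : Prop := out = merge_n_neighbors_alt strings n
instance (strings : List String) (n : Int) (out : List String) : Decidable (Spec_merge_n_neighbors strings n out) := by unfold Spec_merge_n_neighbors; infer_instance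

-- ===== CLAIM (what is proved, stated in full; the proofs are below) =====
def Claim_equal_merge_n_neighbors : Prop := ∀ (strings : List String) (n : Int), Dom_merge_n_neighbors strings n → Pre_merge_n_neighbors strings n → Spec_merge_n_neighbors strings n (merge_n_neighbors strings n)

-- ===== LEMMAS AND PROOFS =====

theorem pv_pyRange_pos_nil {a b n : Int} (hn : 0 < n) (h : b ≤ a) :
    PySem.List.pyRange a b n = [] := by
  rw [PySem.List.pyRange_of_pos _ _ hn, if_neg (by omega)]
  simp

theorem pv_pyRange_pos_cons {L n : Int} (hn : 0 < n) (hL : 0 < L) :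
    PySem.List.pyRange 0 L n = 0 :: (PySem.List.pyRange 0 (L - n) n).map (· + n) := by
  rw [PySem.List.pyRange_of_pos _ _ hn, PySem.List.pyRange_of_pos _ _ hn]
  have hq0 : 0 ≤ (L - 1) / n := Int.ediv_nonneg (by omega) (by omega)
  have hsum : (L - 0 + n - 1) / n = (L - 1) / n + 1 := by
    have := Int.add_mul_ediv_right (L - 1) 1 (show n ≠ 0 by omega)
    have h2 : L - 0 + n - 1 = L - 1 + 1 * n := by ring
    rw [h2, this]
  have hcnt : (if (0:Int) < L then ((L - 0 + n - 1) / n).toNat else 0)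
      = ((L - 1) / n).toNat + 1 := by
    rw [if_pos hL, hsum]; omega
  have hcnt' : (if (0:Int) < L - n then ((L - n - 0 + n - 1) / n).toNat else 0)
      = ((L - 1) / n).toNat := by
    by_cases h : (0:Int) < L - n
    · rw [if_pos h]; congr 1; congr 1; ring
    · rw [if_neg h]
      have : (L - 1) / n = 0 := Int.ediv_eq_zero_of_lt (by omega) (by omega)
      omega
  rw [hcnt, hcnt', List.range_succ_eq_map]
  simp only [List.map_cons, List.map_map]
  refine congrArg₂ _ (by simp) ?_
  apply List.map_congr_left
  intro k _
  simp only [Function.comp_apply]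
  push_cast
  ring

-- A satisfies the chunking recurrence.
theorem pv_A_rec (xs : List String) (n : Int) (hn : 1 ≤ n) (hxs : xs ≠ []) :
    merge_n_neighbors xs n
      = PySem.Str.join " " (xs.take n.toNat) :: merge_n_neighbors (xs.drop n.toNat) n := by
  have hL : 0 < (xs.length : Int) := by
    have := List.length_pos_iff.mpr hxs
    exact_mod_cast this
  unfold merge_n_neighbors
  rw [pv_pyRange_pos_cons (by omega) hL]
  simp only [List.map_cons, List.map_map]
  refine congrArg₂ _ ?_ ?_
  · rw [PySem.List.slice_zero_start, zero_add, PySem.List.slice_to xs (by omega)]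
  · by_cases h : n ≤ (xs.length : Int)
    · have hk : n.toNat ≤ xs.length := by omega
      have hlen : (((xs.drop n.toNat).length : Int)) = (xs.length : Int) - n := by
        simp [List.length_drop]; omega
      rw [hlen]
      apply List.map_congr_left
      intro i hi
      have hi0 : 0 ≤ i := ((PySem.List.mem_pyRange_iff_of_pos (by omega) i).mp hi).1
      simp only [Function.comp_apply]
      congr 1
      rw [PySem.List.slice_toNat _ (by omega) (by omega),
          PySem.List.slice_toNat _ (by omega) (by omega)]
      rw [List.drop_drop]
      congr 1
      · omega
      · congr 1; omega
    · have h1 : xs.drop n.toNat = [] := by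
        apply List.drop_eq_nil_of_le; omega
      rw [h1]
      rw [pv_pyRange_pos_nil (by omega) (by omega),
          pv_pyRange_pos_nil (n := n) (by omega) (by simp)]
      simp

-- the buffer fills without emitting while it stays short of n
theorem pv_fill (n : Int) (ys : List String) : ∀ (cur m : List String),
    ((cur.length : Int) + ys.length < n) →
    ys.foldl (pvStep n) (m, cur) = (m, cur ++ ys) := by
  induction ys with
  | nil => intro cur m _; simp
  | cons y ys ih =>
    intro cur m h
    simp only [List.length_cons] at h
    push_cast at h
    simp only [List.foldl_cons]
    have hne : ¬ (((cur ++ [y]).length : Int) = n) := by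
      simp only [List.length_append, List.length_cons, List.length_nil]
      push_cast
      omega
    have hstep : pvStep n (m, cur) y = (m, cur ++ [y]) := by
      simp only [pvStep]; rw [if_neg hne]
    rw [hstep]
    rw [ih (cur ++ [y]) m (by
      simp only [List.length_append, List.length_cons, List.length_nil]
      push_cast; omega)]
    simp

-- the buffer emits exactly when the n-th element arrives
theorem pv_full (n : Int) (ys : List String) : ∀ (cur m : List String),
    ys ≠ [] → ((cur.length : Int) + ys.length = n) →
    ys.foldl (pvStep n) (m, cur) = (m ++ [PySem.Str.join " " (cur ++ ys)], []) := by
  induction ys with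
  | nil => intro _ _ h _; exact absurd rfl h
  | cons y ys ih =>
    intro cur m _ h
    simp only [List.length_cons] at h
    push_cast at h
    simp only [List.foldl_cons]
    by_cases hys : ys = []
    · subst hys
      have heq : (((cur ++ [y]).length : Int) = n) := by
        simp only [List.length_append, List.length_cons, List.length_nil]
        simp only [List.length_nil] at h
        push_cast at h ⊢; omega
      have hstep : pvStep n (m, cur) y = (m ++ [PySem.Str.join " " (cur ++ [y])], []) := by
        simp only [pvStep]; rw [if_pos heq]
      rw [hstep]
      simp
    · have hys1 : 1 ≤ ys.length := List.length_pos_iff.mpr hys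
      have hlt : ¬ (((cur ++ [y]).length : Int) = n) := by
        simp only [List.length_append, List.length_cons, List.length_nil]
        push_cast; omega
      have hstep : pvStep n (m, cur) y = (m, cur ++ [y]) := by
        simp only [pvStep]; rw [if_neg hlt]
      rw [hstep]
      rw [ih (cur ++ [y]) m hys (by
        simp only [List.length_append, List.length_cons, List.length_nil]
        push_cast; omega)]
      simp

-- main invariant: the buffered pass produces m ++ (A's chunks)
theorem pv_B_inv (n : Int) (hn : 1 ≤ n) : ∀ (L : ℕ) (xs : List String), xs.length = L →
    ∀ m, pvFinish (xs.foldl (pvStep n) (m, [])) = m ++ merge_n_neighbors xs n := by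
  intro L
  induction L using Nat.strong_induction_on with
  | _ L IH =>
    intro xs hLen m
    by_cases hxs : xs = []
    · subst hxs
      simp [pvFinish, merge_n_neighbors, pv_pyRange_pos_nil (show (0:Int) < n by omega) le_rfl]
    · have hsplit := List.take_append_drop n.toNat xs
      by_cases hlt : xs.length < n.toNat
      · have hdrop : xs.drop n.toNat = [] := List.drop_eq_nil_of_le (by omega)
        have := pv_fill n xs [] m (by simp; omega)
        rw [this]
        rw [pv_A_rec xs n hn hxs, hdrop]
        have htake : xs.take n.toNat = xs := List.take_of_length_le (by omega)
        rw [htake]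
        simp [pvFinish, hxs, merge_n_neighbors,
          pv_pyRange_pos_nil (show (0:Int) < n by omega) le_rfl]
      · have hk : n.toNat ≤ xs.length := by omega
        have htlen : (xs.take n.toNat).length = n.toNat := by
          simp [List.length_take]; omega
        have htne : xs.take n.toNat ≠ [] := by
          intro h; rw [h] at htlen; simp at htlen; omega
        conv_lhs => rw [← hsplit]
        rw [List.foldl_append]
        rw [pv_full n (xs.take n.toNat) [] m htne (by rw [List.length_nil, htlen]; push_cast; omega)]
        simp only [List.nil_append]
        rw [IH (xs.drop n.toNat).length (by simp [List.length_drop]; omega)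
              (xs.drop n.toNat) rfl (m ++ [PySem.Str.join " " (xs.take n.toNat)])]
        rw [pv_A_rec xs n hn hxs]
        simp

-- ===== VERDICT (by name: the statement is the Claim_ definition above) =====
theorem merge_n_neighbors_spec : Claim_equal_merge_n_neighbors := by
  intro strings n _ hpre
  unfold Spec_merge_n_neighbors merge_n_neighbors_alt
  have := pv_B_inv n hpre strings.length strings rfl []
  rw [this]
  simp
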